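-- pv_equiv track=rewrite | github.com/rashmie/GO-EBLP | suggest_inconsistencies.py | replace_words_in_sequence_by_token
-- ===== SOURCE A (Python) =====
-- def replace_words_in_sequence_by_token(seq, word_set_to_replace, elem_repString_dict, token_prefix):
--     seq_updated = []
--     for i, word in enumerate(seq):
--         if word in word_set_to_replace:
--             if word not in elem_repString_dict:
--                 rep_string = token_prefix + str(i) + '##'
--                 elem_repString_dict[word] = rep_string
--             else:
--                 rep_string = elem_repString_dict[word]
--             seq_updated.append(rep_string)
--         else:
--             seq_updated.append(word)
--     return seq_updated
-- ===== SOURCE B (Python) =====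
-- def replace_words_in_sequence_by_token(seq, word_set_to_replace, elem_repString_dict, token_prefix):
--     # Stateless closed form: the token for a replaced word is determined directly by
--     # its FIRST position in seq (seq.index), or by a preexisting dict entry; no dict
--     # building or mutation at all.
--     def token(word):
--         if word in elem_repString_dict:
--             return elem_repString_dict[word]
--         return token_prefix + str(seq.index(word)) + '##'
--     return [token(w) if w in word_set_to_replace else w for w in seq]
-- ===== Notes on version B (the rewrite author's own statement) =====
-- stated objective: alternative
-- what changed: A builds the token map statefully, mutating elem_repString_dict while appending; B carries no state at all: each replaced word's token is computed as a closed form from its first occurrence index (seq.index) or the preexisting dict entry, so B never writes to the dict (return-value equivalence; A mutates elem_repString_dict in place, B does not).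
import Mathlib
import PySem

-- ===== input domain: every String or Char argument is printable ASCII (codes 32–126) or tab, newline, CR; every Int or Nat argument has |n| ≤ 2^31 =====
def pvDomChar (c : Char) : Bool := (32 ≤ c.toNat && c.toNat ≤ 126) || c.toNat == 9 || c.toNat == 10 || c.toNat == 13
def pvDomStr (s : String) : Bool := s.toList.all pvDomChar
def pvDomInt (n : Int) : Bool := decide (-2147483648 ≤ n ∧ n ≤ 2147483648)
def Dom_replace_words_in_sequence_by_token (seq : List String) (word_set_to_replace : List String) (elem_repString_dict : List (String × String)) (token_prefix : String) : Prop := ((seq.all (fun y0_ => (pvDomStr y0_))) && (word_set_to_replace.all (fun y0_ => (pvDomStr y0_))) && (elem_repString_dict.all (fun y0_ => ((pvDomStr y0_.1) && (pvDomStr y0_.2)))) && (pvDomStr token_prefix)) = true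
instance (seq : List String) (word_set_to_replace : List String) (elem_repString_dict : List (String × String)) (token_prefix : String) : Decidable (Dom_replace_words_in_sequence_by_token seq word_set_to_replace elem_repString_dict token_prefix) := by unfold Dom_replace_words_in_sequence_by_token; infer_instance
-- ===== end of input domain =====

-- B replaces A's stateful dict-building loop by a stateless closed form (token = first index of the
-- word, via seq.index); equivalence is about the RETURN value only — A mutates elem_repString_dict
-- in place, B does not.

-- ===== PORT A =====
-- token_prefix + str(i) + '##'
def pvRep (token_prefix : String) (i : Int) : String := token_prefix ++ PySem.Int.toStr i ++ "##"

-- one loop iteration of A: state = (seq_updated, elem_repString_dict)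
def pvStepA (word_set_to_replace : List String) (token_prefix : String)
    (st : List String × PySem.Dict String String) (p : Int × String) :
    List String × PySem.Dict String String :=
  if word_set_to_replace.contains p.2 then
    if st.2.contains p.2 = false then
      let rep_string := pvRep token_prefix p.1
      (st.1 ++ [rep_string], st.2.insert p.2 rep_string)
    else
      (st.1 ++ [st.2.getD p.2 ""], st.2)
  else
    (st.1 ++ [p.2], st.2)

def replace_words_in_sequence_by_token (seq : List String) (word_set_to_replace : List String) (elem_repString_dict : List (String × String)) (token_prefix : String) : List String :=
  ((PySem.List.enumerate seq).foldl (pvStepA word_set_to_replace token_prefix)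
    ([], PySem.Dict.ofList elem_repString_dict)).1

-- ===== PORT B =====
-- B's helper `token(word)`: dict entry if present, else the closed-form token from seq.index(word)
def pvTok (seq : List String) (d : PySem.Dict String String) (token_prefix : String) (w : String) : String :=
  match d.get? w with
  | some v => v
  | none => pvRep token_prefix (((PySem.List.index? seq w).getD 0 : Nat) : Int)

def replace_words_in_sequence_by_token_alt (seq : List String) (word_set_to_replace : List String) (elem_repString_dict : List (String × String)) (token_prefix : String) : List String :=
  let d := PySem.Dict.ofList elem_repString_dict
  seq.map (fun w => if word_set_to_replace.contains w then pvTok seq d token_prefix w else w)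

-- ===== PRECONDITION & SPEC =====
def Spec_replace_words_in_sequence_by_token (seq : List String) (word_set_to_replace : List String) (elem_repString_dict : List (String × String)) (token_prefix : String) (out : List String) : Prop := out = replace_words_in_sequence_by_token_alt seq word_set_to_replace elem_repString_dict token_prefix
instance (seq : List String) (word_set_to_replace : List String) (elem_repString_dict : List (String × String)) (token_prefix : String) (out : List String) : Decidable (Spec_replace_words_in_sequence_by_token seq word_set_to_replace elem_repString_dict token_prefix out) := by unfold Spec_replace_words_in_sequence_by_token; infer_instance

-- ===== CLAIM (what is proved, stated in full; the proofs are below) =====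
def Claim_equal_replace_words_in_sequence_by_token : Prop := ∀ (seq : List String) (word_set_to_replace : List String) (elem_repString_dict : List (String × String)) (token_prefix : String), Dom_replace_words_in_sequence_by_token seq word_set_to_replace elem_repString_dict token_prefix → Spec_replace_words_in_sequence_by_token seq word_set_to_replace elem_repString_dict token_prefix (replace_words_in_sequence_by_token seq word_set_to_replace elem_repString_dict token_prefix)

-- ===== LEMMAS AND PROOFS =====

-- first index paired with w in a list of (index, word) pairs
def pvFirst (l : List (Int × String)) (w : String) : Option Int :=
  (l.find? (fun p => p.2 == w)).map Prod.fst

theorem pvFirst_cons_ne (p : Int × String) (l : List (Int × String)) (w : String) (h : p.2 ≠ w) :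
    pvFirst (p :: l) w = pvFirst l w := by
  unfold pvFirst
  rw [List.find?_cons_of_neg (p := fun q : Int × String => q.2 == w) (a := p) (l := l) (by simpa using h)]

theorem pvFirst_cons_self (p : Int × String) (l : List (Int × String)) :
    pvFirst (p :: l) p.2 = some p.1 := by
  unfold pvFirst
  rw [List.find?_cons_of_pos (p := fun q : Int × String => q.2 == p.2) (a := p) (l := l) (by simp)]
  rfl

theorem pvFirst_enumerate (w : String) :
    ∀ (xs : List String) (s : Int),
      pvFirst (PySem.List.enumerate xs s) w = (PySem.List.index? xs w).map (fun k => s + (k : Int)) := by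
  intro xs
  induction xs with
  | nil => intro s; simp [pvFirst, PySem.List.enumerate_nil, PySem.List.index?]
  | cons x xs ih =>
    intro s
    rw [PySem.List.enumerate_cons]
    by_cases hx : x = w
    · subst hx
      rw [PySem.List.index?_cons_self]
      rw [show pvFirst ((s, x) :: PySem.List.enumerate xs (s+1)) x = some s from
            pvFirst_cons_self (s, x) (PySem.List.enumerate xs (s+1))]
      simp
    · rw [PySem.List.index?_cons_of_ne xs hx,
         pvFirst_cons_ne (s, x) _ w (by simpa using hx), ih (s+1)]
      cases PySem.List.index? xs w with
      | none => rfl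
      | some k => simp; omega

-- the main invariant: A's fold produces `f` applied pointwise, for any `f` consistent with the dict
theorem pvFoldA (ws : List String) (pfx : String) (f : String → String)
    (hf : ∀ w, ws.contains w = false → f w = w) :
    ∀ (l : List (Int × String)) (d : PySem.Dict String String) (out : List String),
      (∀ w, ws.contains w = true → w ∈ l.map Prod.snd →
        (∀ v, d.get? w = some v → v = f w) ∧
        (d.get? w = none → ∃ i, pvFirst l w = some i ∧ pvRep pfx i = f w)) →
      (l.foldl (pvStepA ws pfx) (out, d)).1 = out ++ l.map (fun p => f p.2) := by
  intro l
  induction l with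
  | nil => intro d out _; simp
  | cons p rest ih =>
    intro d out H
    rw [List.foldl_cons]
    by_cases hw : ws.contains p.2 = true
    · have hmem : p.2 ∈ (p :: rest).map Prod.snd := by simp
      obtain ⟨Hs, Hn⟩ := H p.2 hw hmem
      by_cases hd : d.contains p.2 = true
      · -- word already bound: A reads the dict
        obtain ⟨v, hv⟩ : ∃ v, d.get? p.2 = some v := by
          rw [PySem.Dict.contains_eq_isSome_get?] at hd
          exact Option.isSome_iff_exists.mp hd
        have hstep : pvStepA ws pfx (out, d) p = (out ++ [d.getD p.2 ""], d) := by
          simp only [pvStepA, hw, if_true]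
          rw [if_neg (by simp [hd])]
        rw [hstep, ih d _ ?_]
        · have : d.getD p.2 "" = f p.2 := by
            rw [PySem.Dict.getD_of_get?_eq_some _ _ hv]; exact Hs v hv
          simp [this, List.append_assoc]
        · intro w hw' hmem'
          refine ⟨(H w hw' (by simp [hmem'])).1, fun hn => ?_⟩
          have hne : p.2 ≠ w := by
            intro he; rw [he, hn] at hv; exact absurd hv (by simp)
          obtain ⟨i, hi, hri⟩ := (H w hw' (by simp [hmem'])).2 hn
          exact ⟨i, by rw [← pvFirst_cons_ne p rest w hne]; exact hi, hri⟩
      · -- fresh word: A inserts the new token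
        have hd' : d.contains p.2 = false := by simpa using hd
        have hn : d.get? p.2 = none := by
          rw [PySem.Dict.contains_eq_isSome_get?] at hd'
          exact Option.not_isSome_iff_eq_none.mp (by simp [hd'])
        obtain ⟨i, hi, hri⟩ := Hn hn
        have hip : i = p.1 := by
          rw [pvFirst_cons_self p rest] at hi
          injection hi with h; exact h.symm
        subst hip
        have hstep : pvStepA ws pfx (out, d) p
            = (out ++ [pvRep pfx p.1], d.insert p.2 (pvRep pfx p.1)) := by
          simp only [pvStepA, hw, if_true, hd']
        rw [hstep, ih (d.insert p.2 (pvRep pfx p.1)) _ ?_]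
        · simp [hri, List.append_assoc]
        · intro w hw' hmem'
          by_cases he : w = p.2
          · subst he
            constructor
            · intro v hv
              rw [PySem.Dict.get?_insert_self] at hv
              injection hv with h
              rw [← h]; exact hri
            · intro hcontra
              rw [PySem.Dict.get?_insert_self] at hcontra
              exact absurd hcontra (by simp)
          · have hg : (d.insert p.2 (pvRep pfx p.1)).get? w = d.get? w :=
              PySem.Dict.get?_insert_of_ne d (pvRep pfx p.1) he
            refine ⟨fun v hv => (H w hw' (by simp [hmem'])).1 v (hg ▸ hv), fun hn' => ?_⟩
            obtain ⟨j, hj, hrj⟩ := (H w hw' (by simp [hmem'])).2 (hg ▸ hn')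
            refine ⟨j, ?_, hrj⟩
            rw [← pvFirst_cons_ne p rest w (fun hpe => he hpe.symm)]
            exact hj
    · -- word not replaced: copied verbatim
      have hw' : ws.contains p.2 = false := by simpa using hw
      have hstep : pvStepA ws pfx (out, d) p = (out ++ [p.2], d) := by
        simp only [pvStepA, hw']; rfl
      rw [hstep, ih d _ ?_]
      · simp [hf p.2 hw', List.append_assoc]
      · intro w hww hmem'
        refine ⟨(H w hww (by simp [hmem'])).1, fun hn => ?_⟩
        have hne : p.2 ≠ w := by
          intro he; rw [he, hww] at hw'; exact Bool.noConfusion hw'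
        obtain ⟨i, hi, hri⟩ := (H w hww (by simp [hmem'])).2 hn
        exact ⟨i, by rw [← pvFirst_cons_ne p rest w hne]; exact hi, hri⟩

-- ===== VERDICT (by name: the statement is the Claim_ definition above) =====
theorem replace_words_in_sequence_by_token_spec : Claim_equal_replace_words_in_sequence_by_token := by
  intro seq ws d0 pfx _
  show _ = _
  unfold replace_words_in_sequence_by_token replace_words_in_sequence_by_token_alt
  have hmain := pvFoldA ws pfx
    (fun w => if ws.contains w then pvTok seq (PySem.Dict.ofList d0) pfx w else w)
    (fun w hw => by simp only [hw]; rfl)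
    (PySem.List.enumerate seq) (PySem.Dict.ofList d0) [] ?_
  · rw [hmain]
    have hmm : (PySem.List.enumerate seq).map
        (fun p => if ws.contains p.2 then pvTok seq (PySem.Dict.ofList d0) pfx p.2 else p.2)
        = ((PySem.List.enumerate seq).map Prod.snd).map
          (fun w => if ws.contains w then pvTok seq (PySem.Dict.ofList d0) pfx w else w) := by
      rw [List.map_map]; rfl
    rw [List.nil_append, hmm, PySem.List.map_snd_enumerate]
  · intro w hw hmem
    rw [PySem.List.map_snd_enumerate] at hmem
    constructor
    · intro v hv
      simp only [hw, if_true, pvTok, hv]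
    · intro hn
      obtain ⟨k, hk⟩ : ∃ k, PySem.List.index? seq w = some k :=
        Option.isSome_iff_exists.mp ((PySem.List.index?_isSome_iff seq w).mpr hmem)
      refine ⟨(k : Int), ?_, ?_⟩
      · rw [pvFirst_enumerate, hk]; simp
      · simp only [hw, if_true, pvTok, hn, hk, Option.getD_some]
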